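-- pv_equiv track=rewrite | github.com/dtentiion/MCLCE-iOS | scripts/gen-test-swf.py | bits_needed
-- ===== SOURCE A (Python) =====
-- def bits_needed(value: int) -> int:
--     """Number of bits needed to represent value as signed SWF int."""
--     if value == 0:
--         return 0
--     if value < 0:
--         value = -value - 1
--     n = 1
--     while (1 << n) <= value:
--         n += 1
--     return n + 1  # +1 for sign bit
-- ===== SOURCE B (Python) =====
-- def bits_needed(value: int) -> int:
--     """Number of bits needed to represent value as signed SWF int."""
--     if value == 0:
--         return 0
--     if value < 0:
--         value = -value - 1
--     return max(value.bit_length(), 1) + 1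
-- ===== Notes on version B (the rewrite author's own statement) =====
-- stated objective: idiomatic
-- what changed: Replaced the iterative bit-scan while loop with the closed-form int.bit_length() built-in (max with 1 to keep the loop's floor at n=1).
import Mathlib
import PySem

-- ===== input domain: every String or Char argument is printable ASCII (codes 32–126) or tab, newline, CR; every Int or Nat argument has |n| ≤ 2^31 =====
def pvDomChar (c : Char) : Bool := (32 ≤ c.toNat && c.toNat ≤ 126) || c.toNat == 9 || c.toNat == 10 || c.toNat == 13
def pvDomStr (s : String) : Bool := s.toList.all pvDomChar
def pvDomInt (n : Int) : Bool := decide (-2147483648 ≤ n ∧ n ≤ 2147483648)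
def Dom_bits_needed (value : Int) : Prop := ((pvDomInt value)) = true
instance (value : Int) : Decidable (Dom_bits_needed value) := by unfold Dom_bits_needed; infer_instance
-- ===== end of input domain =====

-- B replaces A's iterative bit-scan loop with the closed-form bit_length built-in (idiomatic).


-- ===== PORT A =====
-- A's while loop: n starts at 1 and is incremented while (1 << n) <= value.
-- v is nonnegative here (value > 0, or transformed -value-1 ≥ 0), so Nat suffices.
def bitsLoopA (v : Nat) (n : Nat) : Nat :=
  if 2 ^ n ≤ v then bitsLoopA v (n + 1) else n
termination_by v + 1 - 2 ^ n
decreasing_by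
  have h1 : (1:Nat) ≤ 2 ^ n := Nat.one_le_two_pow
  have h2 : 2 ^ (n + 1) = 2 ^ n + 2 ^ n := by ring
  rw [h2]
  omega

def bits_needed (value : Int) : Int :=
  if value = 0 then 0
  else
    let v : Int := if value < 0 then -value - 1 else value
    (bitsLoopA v.toNat 1 : Int) + 1

-- ===== PORT B =====
-- value.bit_length() for a nonnegative int is Nat.size.
def bits_needed_alt (value : Int) : Int :=
  if value = 0 then 0
  else
    let v : Int := if value < 0 then -value - 1 else value
    (max (Nat.size v.toNat) 1 : Nat) + 1

-- ===== PRECONDITION & SPEC =====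
def Spec_bits_needed (value : Int) (out : Int) : Prop := out = bits_needed_alt value
instance (value : Int) (out : Int) : Decidable (Spec_bits_needed value out) := by unfold Spec_bits_needed; infer_instance

-- ===== CLAIM (what is proved, stated in full; the proofs are below) =====
def Claim_equal_bits_needed : Prop := ∀ (value : Int), Dom_bits_needed value → Spec_bits_needed value (bits_needed value)

-- ===== LEMMAS AND PROOFS =====
theorem bitsLoopA_eq_max_size (v n : Nat) : bitsLoopA v n = max (Nat.size v) n := by
  fun_induction bitsLoopA v n with
  | case1 n h ih =>
      rw [ih]
      have : n < Nat.size v := Nat.lt_size.mpr h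
      omega
  | case2 n h =>
      have : Nat.size v ≤ n := Nat.size_le.mpr (by omega)
      omega

-- ===== VERDICT (by name: the statement is the Claim_ definition above) =====
theorem bits_needed_spec : Claim_equal_bits_needed := by
  intro value _
  unfold Spec_bits_needed bits_needed bits_needed_alt
  split_ifs with h
  · rfl
  all_goals (simp only [bitsLoopA_eq_max_size]; try omega)
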